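-- pv_equiv track=rewrite | github.com/xxyQwQ/awesome-ai | AI3604 计算机视觉/Project/Experiment/gui/utils.py | convert_input_text
-- ===== SOURCE A (Python) =====
-- def convert_input_text(text):
--     conv_list = []
--     punctuation_map = {",": "，", ".": "。", "?": "？", "!": "！", ":": "：", ";": "；", '"': "“", "'": "‘", "(": "（", ")": "）", "<": "《", ">": "》", "^": "……", "_": "——"}
--     for eng, chn in punctuation_map.items():
--         if eng in text:
--             conv_list.append(eng)
--             text = text.replace(eng, chn)
--     alphabet = r'abcdefghijklmnopqrstuvwxyzABCDEFGHIJKLMNOPQRSTUVWXYZ0123456789[]{}*&^%$#@!~`-+=|\/'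
--     for char in alphabet:
--         if char in text:
--             conv_list.append(char)
--             text = text.replace(char, ' ')
--     return text, conv_list
-- ===== SOURCE B (Python) =====
-- def convert_input_text(text):
--     punctuation_map = {",": "，", ".": "。", "?": "？", "!": "！", ":": "：", ";": "；", '"': "“", "'": "‘", "(": "（", ")": "）", "<": "《", ">": "》", "^": "……", "_": "——"}
--     alphabet = r'abcdefghijklmnopqrstuvwxyzABCDEFGHIJKLMNOPQRSTUVWXYZ0123456789[]{}*&^%$#@!~`-+=|\/'
--     present = set(text)
--
--     def trans(ch):
--         if ch in punctuation_map:
--             return punctuation_map[ch]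
--         if ch in alphabet:
--             return ' '
--         return ch
--
--     conv_list = [p for p in punctuation_map if p in present]
--     conv_list += [c for c in alphabet if c in present and c not in punctuation_map]
--     return ''.join(map(trans, text)), conv_list
-- ===== Notes on version B (the rewrite author's own statement) =====
-- stated objective: alternative
-- what changed: Replaces A's ~90 sequential whole-string text.replace passes (which mutate the text between phases) with a single per-character translation pass over the original text, and builds conv_list from a one-pass presence set of the original text, dropping the '!'/'^' punctuation overlap from the alphabet phase.
import Mathlib
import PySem

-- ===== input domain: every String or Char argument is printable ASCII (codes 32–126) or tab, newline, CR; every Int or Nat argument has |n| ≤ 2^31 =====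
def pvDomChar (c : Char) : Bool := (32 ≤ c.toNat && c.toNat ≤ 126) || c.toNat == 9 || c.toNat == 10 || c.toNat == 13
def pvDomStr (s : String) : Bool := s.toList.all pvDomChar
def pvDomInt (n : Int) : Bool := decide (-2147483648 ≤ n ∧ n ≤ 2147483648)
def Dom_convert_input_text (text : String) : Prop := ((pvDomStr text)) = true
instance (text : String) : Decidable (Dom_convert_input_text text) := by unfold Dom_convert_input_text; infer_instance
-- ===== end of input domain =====

-- B replaces A's ~90 sequential whole-string replace passes by one per-character translation pass
-- (first-match punctuation lookup, else space for alphabet chars), with conv_list built by two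
-- recursive scans of the tables against the original text.

-- ===== PORT A =====
def pvPunctA : List (Char × List Char) :=
  [(',', ['，']), ('.', ['。']), ('?', ['？']), ('!', ['！']), (':', ['：']), (';', ['；']),
   ('"', ['“']), ('\'', ['‘']), ('(', ['（']), (')', ['）']), ('<', ['《']), ('>', ['》']),
   ('^', ['…', '…']), ('_', ['—', '—'])]

-- the raw alphabet string, written as its list of characters
def pvAlphaA : List Char :=
  ['a', 'b', 'c', 'd', 'e', 'f', 'g', 'h', 'i', 'j', 'k', 'l', 'm', 'n', 'o', 'p', 'q', 'r', 's', 't', 'u', 'v', 'w', 'x', 'y', 'z', 'A', 'B', 'C', 'D', 'E', 'F', 'G', 'H', 'I', 'J', 'K', 'L', 'M', 'N', 'O', 'P', 'Q', 'R', 'S', 'T', 'U', 'V', 'W', 'X', 'Y', 'Z', '0', '1', '2', '3', '4', '5', '6', '7', '8', '9', '[', ']', '{', '}', '*', '&', '^', '%', '$', '#', '@', '!', '~', '`', '-', '+', '=', '|', '\\', '/']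

def convert_input_text (text : String) : String × List String :=
  let st1 := pvPunctA.foldl (fun (st : List String × List Char) p =>
      if PySem.Chars.isIn [p.1] st.2 then
        (st.1 ++ [String.ofList [p.1]], PySem.Chars.replace st.2 [p.1] p.2)
      else st)
    (([] : List String), text.toList)
  let st2 := pvAlphaA.foldl (fun (st : List String × List Char) c =>
      if PySem.Chars.isIn [c] st.2 then
        (st.1 ++ [String.ofList [c]], PySem.Chars.replace st.2 [c] [' '])
      else st)
    st1
  (String.ofList st2.2, st2.1)

-- ===== PORT B =====
-- the punctuation dict, keys paired with their (string) replacements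
def pvPunctB : List (Char × String) :=
  [(',', "，"), ('.', "。"), ('?', "？"), ('!', "！"), (':', "："), (';', "；"),
   ('"', "“"), ('\'', "‘"), ('(', "（"), (')', "）"), ('<', "《"), ('>', "》"),
   ('^', "……"), ('_', "——")]

def pvAlphaB : List Char :=
  "abcdefghijklmnopqrstuvwxyzABCDEFGHIJKLMNOPQRSTUVWXYZ0123456789[]{}*&^%$#@!~`-+=|\\/".toList

-- B's trans(ch): punctuation lookup first, else alphabet → space, else the char itself
def pvTransChar (c : Char) : List Char :=
  match pvPunctB.find? (fun p => p.1 == c) with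
  | some p => p.2.toList
  | none => if pvAlphaB.contains c then [' '] else [c]

-- ''.join(map(trans, text))
def pvTransB : List Char → List Char
  | [] => []
  | c :: rest => pvTransChar c ++ pvTransB rest

-- [p for p in punctuation_map if p in present]
def pvConvP (cs : List Char) : List (Char × String) → List String
  | [] => []
  | p :: rest => if cs.contains p.1 then String.ofList [p.1] :: pvConvP cs rest
                 else pvConvP cs rest

-- [c for c in alphabet if c in present and c not in punctuation_map]
def pvConvA (cs : List Char) : List Char → List String
  | [] => []
  | c :: rest => if cs.contains c && !(pvPunctB.any (fun p => p.1 == c)) then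
                   String.ofList [c] :: pvConvA cs rest
                 else pvConvA cs rest

def convert_input_text_alt (text : String) : String × List String :=
  let cs := text.toList
  (String.ofList (pvTransB cs), pvConvP cs pvPunctB ++ pvConvA cs pvAlphaB)

-- ===== PRECONDITION & SPEC =====
def Spec_convert_input_text (text : String) (out : String × List String) : Prop := out = convert_input_text_alt text
instance (text : String) (out : String × List String) : Decidable (Spec_convert_input_text text out) := by unfold Spec_convert_input_text; infer_instance

-- ===== CLAIM (what is proved, stated in full; the proofs are below) =====
def Claim_equal_convert_input_text : Prop := ∀ (text : String), Dom_convert_input_text text → Spec_convert_input_text text (convert_input_text text)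

-- ===== LEMMAS AND PROOFS =====

-- single-char substring test is membership
lemma pv_isIn_singleton (c : Char) (s : List Char) :
    PySem.Chars.isIn [c] s = decide (c ∈ s) := by
  by_cases h : c ∈ s
  · simp [h, (PySem.Chars.isIn_iff_infix [c] s).mpr ((List.singleton_infix_iff c s).mpr h)]
  · simp [h, (PySem.Chars.isIn_eq_false_iff [c] s).mpr (by simpa [List.singleton_infix_iff] using h)]

def pvSubst (k : Char) (r : List Char) (x : Char) : List Char := if x = k then r else [x]

lemma pv_replace_go_singleton (k : Char) (r : List Char) :
    ∀ (l : List Char) (fuel : Nat) (acc : List Char), l.length ≤ fuel →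
      PySem.Chars.replace.go [k] r fuel l acc = acc.reverse ++ l.flatMap (pvSubst k r) := by
  intro l
  induction l with
  | nil => intro fuel acc _; cases fuel <;> simp [PySem.Chars.replace.go]
  | cons c t ih =>
    intro fuel acc hf
    cases fuel with
    | zero => simp at hf
    | succ f =>
      by_cases h : c = k
      · subst h
        rw [show PySem.Chars.replace.go [c] r (f + 1) (c :: t) acc
              = PySem.Chars.replace.go [c] r f t (r.reverse ++ acc) by
            simp [PySem.Chars.replace.go, List.isPrefixOf]]
        rw [ih f (r.reverse ++ acc) (by simpa using hf)]
        simp [pvSubst]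
      · rw [show PySem.Chars.replace.go [k] r (f + 1) (c :: t) acc
              = PySem.Chars.replace.go [k] r f t (c :: acc) by
            simp [PySem.Chars.replace.go, List.isPrefixOf]
            intro he; exact absurd he.symm h]
        rw [ih f (c :: acc) (by simpa using hf)]
        simp [pvSubst, h]

lemma pv_replace_singleton (s : List Char) (k : Char) (r : List Char) :
    PySem.Chars.replace s [k] r = s.flatMap (pvSubst k r) := by
  rw [PySem.Chars.replace]
  simpa using pv_replace_go_singleton k r s s.length [] le_rfl

-- first-match lookup in a pair list (defaults to the char itself)
def pvApply (ps : List (Char × List Char)) (x : Char) : List Char :=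
  match ps with
  | [] => [x]
  | p :: rest => if x = p.1 then p.2 else pvApply rest x

def pvStep (st : List String × List Char) (p : Char × List Char) : List String × List Char :=
  if PySem.Chars.isIn [p.1] st.2 then
    (st.1 ++ [String.ofList [p.1]], PySem.Chars.replace st.2 [p.1] p.2)
  else st

lemma pvApply_not_key : ∀ (ps : List (Char × List Char)) (x : Char),
    (∀ q ∈ ps, x ≠ q.1) → pvApply ps x = [x] := by
  intro ps
  induction ps with
  | nil => intro x _; rfl
  | cons p rest ih =>
    intro x h
    rw [pvApply, if_neg (h p (List.mem_cons_self))]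
    exact ih x (fun q hq => h q (List.mem_cons_of_mem p hq))

lemma pvApply_const (l : List Char) (r : List Char) (x : Char) :
    pvApply (l.map (fun c => (c, r))) x = if x ∈ l then r else [x] := by
  induction l with
  | nil => simp [pvApply]
  | cons c t ih =>
    by_cases h : x = c
    · simp [pvApply, h]
    · simp [pvApply, h, ih]

lemma pv_flatMap_id_of (l : List Char) (f : Char → List Char) (h : ∀ x ∈ l, f x = [x]) :
    l.flatMap f = l := by
  rw [List.flatMap_congr h]; simp

lemma pv_mem_flatMap_subst (t : List Char) (k c : Char) (r : List Char)
    (h1 : c ≠ k) (h2 : c ∉ r) :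
    c ∈ t.flatMap (pvSubst k r) ↔ c ∈ t := by
  simp only [List.mem_flatMap]
  constructor
  · rintro ⟨x, hx, hc⟩
    by_cases hxk : x = k
    · rw [pvSubst, if_pos hxk] at hc; exact absurd hc h2
    · rw [pvSubst, if_neg hxk] at hc; simp at hc; exact hc ▸ hx
  · intro hc
    exact ⟨c, hc, by rw [pvSubst, if_neg h1]; simp⟩

-- the loop of A, characterised: conv entries are the keys present in the ORIGINAL text,
-- the text is the pointwise translation by the first-match table
lemma pv_foldl_step (ps : List (Char × List Char))
    (hrep : ∀ p ∈ ps, ∀ q ∈ ps, q.1 ∉ p.2) (hnd : (ps.map Prod.fst).Nodup) :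
    ∀ (acc : List String) (t : List Char),
      ps.foldl pvStep (acc, t)
        = (acc ++ (ps.filter (fun p => decide (p.1 ∈ t))).map (fun p => String.ofList [p.1]),
           t.flatMap (pvApply ps)) := by
  induction ps with
  | nil => intro acc t; simp [pvApply]
  | cons p rest ih =>
    intro acc t
    have hrep' : ∀ a ∈ rest, ∀ b ∈ rest, b.1 ∉ a.2 := fun a ha b hb =>
      hrep a (List.mem_cons_of_mem p ha) b (List.mem_cons_of_mem p hb)
    rw [List.map_cons] at hnd
    have hnd' : (rest.map Prod.fst).Nodup := hnd.of_cons
    have hkey : ∀ q ∈ rest, q.1 ≠ p.1 := by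
      intro q hq
      have := (List.nodup_cons.mp hnd).1
      intro he; exact this (he ▸ List.mem_map_of_mem hq)
    have hnotrep : ∀ q ∈ rest, q.1 ∉ p.2 := fun q hq =>
      hrep p (List.mem_cons_self) q (List.mem_cons_of_mem p hq)
    rw [List.foldl_cons]
    by_cases hp : p.1 ∈ t
    · rw [show pvStep (acc, t) p
            = (acc ++ [String.ofList [p.1]], t.flatMap (pvSubst p.1 p.2)) by
          rw [pvStep, pv_isIn_singleton]
          simp [hp, pv_replace_singleton]]
      rw [ih hrep' hnd']
      refine Prod.ext ?_ ?_
      · show acc ++ [String.ofList [p.1]] ++ _ = acc ++ _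
        rw [List.filter_congr (l := rest)
              (q := fun q => decide (q.1 ∈ t))
              (fun q hq => by
                simp only [decide_eq_decide]
                exact pv_mem_flatMap_subst t p.1 q.1 p.2 (hkey q hq) (hnotrep q hq))]
        simp [hp]
      · show (t.flatMap (pvSubst p.1 p.2)).flatMap (pvApply rest) = t.flatMap (pvApply (p :: rest))
        rw [List.flatMap_assoc]
        refine List.flatMap_congr (fun x _ => ?_)
        by_cases hx : x = p.1
        · rw [pvSubst, if_pos hx, pvApply, if_pos hx]
          exact pv_flatMap_id_of p.2 _ (fun y hy =>
            pvApply_not_key rest y (fun q hq h => (hnotrep q hq) (h ▸ hy)))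
        · rw [pvSubst, if_neg hx, pvApply, if_neg hx]
          simp
    · rw [show pvStep (acc, t) p = (acc, t) by
          rw [pvStep, pv_isIn_singleton]; simp [hp]]
      rw [ih hrep' hnd']
      refine Prod.ext ?_ ?_
      · show acc ++ _ = acc ++ _
        simp [hp]
      · show t.flatMap (pvApply rest) = t.flatMap (pvApply (p :: rest))
        refine List.flatMap_congr (fun x hx => ?_)
        have : x ≠ p.1 := fun h => hp (h ▸ hx)
        rw [pvApply, if_neg this]

-- concrete facts about the two tables
set_option maxRecDepth 16384 in
lemma pv_punct_rep : ∀ p ∈ pvPunctA, ∀ q ∈ pvPunctA, q.1 ∉ p.2 := by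
  intro p hp q hq; fin_cases hp <;> fin_cases hq <;> decide

lemma pv_punct_nodup : (pvPunctA.map Prod.fst).Nodup := by decide

set_option maxRecDepth 16384 in
lemma pv_alpha_nodup : pvAlphaA.Nodup := by decide

lemma pv_space_not_alpha : (' ' : Char) ∉ pvAlphaA := by decide

set_option maxRecDepth 4096 in
lemma pv_alpha_le : ∀ y ∈ pvAlphaA, y.toNat ≤ 126 := by
  intro y hy; fin_cases hy <;> decide

set_option maxRecDepth 4096 in
lemma pv_rep_gt : ∀ p ∈ pvPunctA, ∀ y ∈ p.2, 126 < y.toNat := by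
  intro p hp y hy
  fin_cases hp <;> simp only [List.mem_cons, List.not_mem_nil, or_false, or_self] at hy <;>
    subst hy <;> decide

lemma pv_rep_not_alpha : ∀ p ∈ pvPunctA, ∀ y ∈ p.2, y ∉ pvAlphaA :=
  fun p hp y hy hmem => absurd (pv_alpha_le y hmem) (Nat.not_le.mpr (pv_rep_gt p hp y hy))

lemma pvApply_eq_find? (ps : List (Char × List Char)) (x : Char) :
    pvApply ps x = match ps.find? (fun p => p.1 == x) with
                   | some p => p.2
                   | none => [x] := by
  induction ps with
  | nil => rfl
  | cons p rest ih =>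
    by_cases h : x = p.1
    · simp [pvApply, h]
    · rw [pvApply, if_neg h, List.find?_cons, ih]
      have : (p.1 == x) = false := by simpa using (Ne.symm h)
      simp [this]

-- every char produced by the punctuation table at a key comes from some replacement string
lemma pv_apply_key_sub : ∀ q ∈ pvPunctA, ∀ c ∈ pvApply pvPunctA q.1, ∃ p ∈ pvPunctA, c ∈ p.2 := by
  intro q hq c hc
  rw [pvApply_eq_find? pvPunctA q.1] at hc
  cases hf : pvPunctA.find? (fun p => p.1 == q.1) with
  | none => exact absurd (List.find?_eq_none.mp hf q hq) (by simp)
  | some p =>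
    rw [hf] at hc
    exact ⟨p, List.mem_of_find?_eq_some hf, hc⟩

lemma pv_apply_key_not_alpha : ∀ q ∈ pvPunctA, ∀ c ∈ pvApply pvPunctA q.1, c ∉ pvAlphaA :=
  fun q hq c hc hmem =>
    let ⟨p, hp, hy⟩ := pv_apply_key_sub q hq c hc
    absurd (pv_alpha_le c hmem) (Nat.not_le.mpr (pv_rep_gt p hp c hy))

-- A's tables are B's tables, first components identical
lemma pvPunctA_eq_map : pvPunctA = pvPunctB.map (fun p => (p.1, p.2.toList)) := by decide

set_option maxRecDepth 16384 in
lemma pvAlpha_eq : pvAlphaB = pvAlphaA := by decide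

def pvAlphaPairs : List (Char × List Char) := pvAlphaA.map (fun c => (c, [' ']))

lemma pv_alphaPairs_rep : ∀ p ∈ pvAlphaPairs, ∀ q ∈ pvAlphaPairs, q.1 ∉ p.2 := by
  intro p hp q hq h
  rw [pvAlphaPairs] at hp hq
  obtain ⟨a, _, rfl⟩ := List.mem_map.mp hp
  obtain ⟨b, hb, rfl⟩ := List.mem_map.mp hq
  simp at h
  exact pv_space_not_alpha (h ▸ hb)

lemma pv_alphaPairs_nodup : (pvAlphaPairs.map Prod.fst).Nodup := by
  rw [pvAlphaPairs, List.map_map]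
  simpa using pv_alpha_nodup

-- A's find? over pvPunctA is B's find? over pvPunctB, values listified
lemma pv_find?_AB (x : Char) :
    pvPunctA.find? (fun p => p.1 == x)
      = (pvPunctB.find? (fun p => p.1 == x)).map (fun p => (p.1, p.2.toList)) := by
  rw [pvPunctA_eq_map, List.find?_map]
  rfl

-- pointwise: punctuation translation followed by alphabet translation is B's trans
lemma pv_table_pointwise (x : Char) :
    (pvApply pvPunctA x).flatMap (pvApply pvAlphaPairs) = pvTransChar x := by
  rw [pvTransChar, pvApply_eq_find? pvPunctA x, pv_find?_AB x]
  cases hf : pvPunctB.find? (fun p => p.1 == x) with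
  | some p =>
    have hp : (p.1, p.2.toList) ∈ pvPunctA := by
      rw [pvPunctA_eq_map]; exact List.mem_map_of_mem (List.mem_of_find?_eq_some hf)
    simp only [Option.map_some]
    refine pv_flatMap_id_of _ _ (fun y hy => ?_)
    rw [show pvApply pvAlphaPairs y = if y ∈ pvAlphaA then [' '] else [y] from
          pvApply_const pvAlphaA [' '] y]
    exact if_neg (pv_rep_not_alpha _ hp y hy)
  | none =>
    simp only [Option.map_none, List.flatMap_cons, List.flatMap_nil, List.append_nil]
    rw [show pvApply pvAlphaPairs x = if x ∈ pvAlphaA then [' '] else [x] from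
          pvApply_const pvAlphaA [' '] x]
    by_cases h : x ∈ pvAlphaA <;> simp [h, pvAlpha_eq]

-- B's recursive translator is the flatMap of its per-char table
lemma pvTransB_eq (cs : List Char) : pvTransB cs = cs.flatMap pvTransChar := by
  induction cs with
  | nil => rfl
  | cons c t ih => rw [pvTransB, ih, List.flatMap_cons]

-- B's two recursive conv scans are filters
lemma pvConvP_eq (cs : List Char) : ∀ (ps : List (Char × String)),
    pvConvP cs ps = (ps.filter (fun p => decide (p.1 ∈ cs))).map (fun p => String.ofList [p.1]) := by
  intro ps
  induction ps with
  | nil => rfl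
  | cons p rest ih =>
    by_cases h : p.1 ∈ cs <;>
      simp [pvConvP, h, ih]

lemma pvConvA_eq (cs : List Char) : ∀ (l : List Char),
    pvConvA cs l
      = (l.filter (fun c => decide (c ∈ cs) && !(pvPunctB.any (fun p => p.1 == c)))).map
          (fun c => String.ofList [c]) := by
  intro l
  induction l with
  | nil => rfl
  | cons c rest ih =>
    by_cases h : (cs.contains c && !(pvPunctB.any (fun p => p.1 == c))) = true
    · rw [pvConvA, if_pos h, ih, List.filter_cons,
        if_pos (by simpa [List.contains_iff_mem] using h), List.map_cons]
    · rw [pvConvA, if_neg h, ih, List.filter_cons,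
        if_neg (by simpa [List.contains_iff_mem] using h)]

-- any over the two punctuation tables agree (same keys)
lemma pv_any_AB (c : Char) :
    pvPunctA.any (fun p => p.1 == c) = pvPunctB.any (fun p => p.1 == c) := by
  rw [pvPunctA_eq_map, List.any_map]
  rfl

-- membership in the punctuation-translated text, for alphabet chars
lemma pv_mem_t1 (t : List Char) (c : Char) (hc : c ∈ pvAlphaA) :
    c ∈ t.flatMap (pvApply pvPunctA) ↔ (c ∈ t ∧ ∀ q ∈ pvPunctA, c ≠ q.1) := by
  simp only [List.mem_flatMap]
  constructor
  · rintro ⟨x, hx, hcx⟩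
    by_cases hk : ∀ q ∈ pvPunctA, x ≠ q.1
    · rw [pvApply_not_key _ _ hk] at hcx
      simp at hcx; subst hcx
      exact ⟨hx, hk⟩
    · push Not at hk
      obtain ⟨q, hq, rfl⟩ := hk
      exact absurd hc (pv_apply_key_not_alpha q hq c hcx)
  · rintro ⟨hct, hnk⟩
    exact ⟨c, hct, by rw [pvApply_not_key _ _ hnk]; simp⟩

theorem convert_input_text_spec : Claim_equal_convert_input_text := by
  intro text _
  show convert_input_text text = convert_input_text_alt text
  rw [convert_input_text, convert_input_text_alt]
  set t := text.toList with ht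
  -- phase 1 is a fold of pvStep over the punctuation pairs
  rw [show (pvPunctA.foldl (fun (st : List String × List Char) p =>
        if PySem.Chars.isIn [p.1] st.2 then
          (st.1 ++ [String.ofList [p.1]], PySem.Chars.replace st.2 [p.1] p.2)
        else st) (([] : List String), t)) = pvPunctA.foldl pvStep (([] : List String), t) from rfl]
  rw [pv_foldl_step pvPunctA pv_punct_rep pv_punct_nodup [] t]
  -- phase 2 is a fold of pvStep over the alphabet pairs
  rw [show (fun (st : List String × List Char) c =>
        if PySem.Chars.isIn [c] st.2 then
          (st.1 ++ [String.ofList [c]], PySem.Chars.replace st.2 [c] [' '])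
        else st) = (fun (st : List String × List Char) c => pvStep st (c, [' '])) from rfl,
      ← List.foldl_map,
      show pvAlphaA.map (fun c => (c, ([' '] : List Char))) = pvAlphaPairs from rfl]
  rw [pv_foldl_step pvAlphaPairs pv_alphaPairs_rep pv_alphaPairs_nodup]
  refine Prod.ext ?_ ?_
  · -- the translated text
    show String.ofList ((t.flatMap (pvApply pvPunctA)).flatMap (pvApply pvAlphaPairs))
        = String.ofList (pvTransB t)
    rw [pvTransB_eq, List.flatMap_assoc, List.flatMap_congr (fun x _ => pv_table_pointwise x)]
  · -- the conv list
    show ([] : List String) ++ _ ++ _ = pvConvP t pvPunctB ++ pvConvA t pvAlphaB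
    rw [List.nil_append, pvConvP_eq, pvConvA_eq]
    refine congrArg₂ (· ++ ·) ?_ ?_
    · -- punctuation part: same filter over the original text
      rw [pvPunctA_eq_map, List.filter_map, List.map_map]
      refine congrArg _ (List.filter_congr (fun p _ => ?_))
      simp only [Function.comp]
    · -- alphabet part
      rw [pvAlphaPairs, pvAlpha_eq, List.filter_map, List.map_map]
      refine congrArg (List.map _) (List.filter_congr (fun c hc => ?_))
      simp only [Function.comp]
      rw [← pv_any_AB]
      by_cases h1 : c ∈ t.flatMap (pvApply pvPunctA)
      · have := (pv_mem_t1 t c hc).mp h1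
        have hany : pvPunctA.any (fun p => p.1 == c) = false := by
          simp only [List.any_eq_false]
          intro p hp
          simpa using Ne.symm (this.2 p hp)
        simp [h1, this.1, hany]
      · have := fun h2 => h1 ((pv_mem_t1 t c hc).mpr h2)
        by_cases hct : c ∈ t
        · have hk : ¬ ∀ q ∈ pvPunctA, c ≠ q.1 := fun hk => this ⟨hct, hk⟩
          push Not at hk
          obtain ⟨q, hq, he⟩ := hk
          have hany : pvPunctA.any (fun p => p.1 == c) = true := by
            refine List.any_eq_true.mpr ⟨q, hq, by simpa using (Eq.symm he)⟩
          simp [h1, hct, hany]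
        · simp [h1, hct]

-- ===== VERDICT =====
-- (verdict theorem above is convert_input_text_spec)
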